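-- pv_equiv track=rewrite | github.com/pmaengineering/pmix | pmix/utils.py | is_proper_number
-- ===== SOURCE A (Python) =====
-- import string
--
-- VALID_NUMBER_ALPHABET = tuple(string.ascii_letters + string.digits + '._-')
--
-- def is_proper_number(text: str):
--     if len(text) < 2:
--         return False
--     ends_with = ['.', ':', ')']
--     proper_ending = any(text.endswith(ending) for ending in ends_with)
--     if not proper_ending:
--         return False
--     if len(text) == 2 and text[0] in string.ascii_letters:
--         return True
--     number, delimiter = text[:-1], text[-1]
--     has_digit = any(i.isdigit() for i in number)
--     all_valid_characters = all(i in VALID_NUMBER_ALPHABET for i in number)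
--     first_valid = number[0] in string.ascii_letters + string.digits
--     last_valid = number[-1] in string.ascii_letters + string.digits
--     return has_digit and all_valid_characters and first_valid and last_valid
-- ===== SOURCE B (Python) =====
-- import string
--
-- _ALNUM = set(string.ascii_letters + string.digits)
-- _VALID = set(string.ascii_letters + string.digits + '._-')
-- _DELIM = {'.', ':', ')'}
--
--
-- def is_proper_number(text: str):
--     # one left-to-right pass: a small state machine over the characters
--     accept = False
--     n = 0
--     first_alnum = False
--     all_valid = True
--     has_digit = False
--     prev_alnum = False
--     for ch in text:
--         accept = (ch in _DELIM and first_alnum and all_valid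
--                   and prev_alnum and (has_digit or n == 1))
--         if n == 0:
--             first_alnum = ch in _ALNUM
--         all_valid = all_valid and ch in _VALID
--         has_digit = has_digit or ch.isdigit()
--         prev_alnum = ch in _ALNUM
--         n += 1
--     return accept
-- ===== Notes on version B (the rewrite author's own statement) =====
-- stated objective: alternative
-- what changed: Replaces A's separate scans (endswith test, any() digit scan, all() alphabet scan, first/last index checks, special two-char branch) with a single left-to-right pass that carries a small state (first/last-char alnum, all-valid, has-digit, position) and folds the two-char special case into one accept condition.
import Mathlib
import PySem

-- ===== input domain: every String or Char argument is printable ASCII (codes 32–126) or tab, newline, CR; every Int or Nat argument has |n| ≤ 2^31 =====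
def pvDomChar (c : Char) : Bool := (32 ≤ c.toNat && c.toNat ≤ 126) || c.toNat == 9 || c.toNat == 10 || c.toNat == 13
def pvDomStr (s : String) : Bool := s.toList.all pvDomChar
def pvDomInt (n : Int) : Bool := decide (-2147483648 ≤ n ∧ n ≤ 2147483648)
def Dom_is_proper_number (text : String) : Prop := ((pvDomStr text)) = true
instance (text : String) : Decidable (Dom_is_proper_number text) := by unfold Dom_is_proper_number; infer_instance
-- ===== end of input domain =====

-- B replaces A's separate scans (endswith, any, all, first/last index checks) by a single
-- left-to-right pass over the characters (objective: alternative; identical return values).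

-- module-level character constants (string.ascii_letters, string.digits, the alphabet), shared by both Pythons
def asciiLetters : List Char := ['a', 'b', 'c', 'd', 'e', 'f', 'g', 'h', 'i', 'j', 'k', 'l', 'm', 'n', 'o', 'p', 'q', 'r', 's', 't', 'u', 'v', 'w', 'x', 'y', 'z', 'A', 'B', 'C', 'D', 'E', 'F', 'G', 'H', 'I', 'J', 'K', 'L', 'M', 'N', 'O', 'P', 'Q', 'R', 'S', 'T', 'U', 'V', 'W', 'X', 'Y', 'Z']
def asciiDigits : List Char := ['0', '1', '2', '3', '4', '5', '6', '7', '8', '9']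
def validNumberAlphabet : List Char := asciiLetters ++ asciiDigits ++ ['.', '_', '-']

-- ===== PORT A =====
def is_proper_number (text : String) : Bool :=
  let cs := text.toList
  if cs.length < 2 then false
  else
    let ends_with : List (List Char) := [['.'], [':'], [')']]
    let proper_ending := ends_with.any (fun e => PySem.Chars.endswith cs e)
    if !proper_ending then false
    else if cs.length == 2 && ((PySem.List.pyGet? cs 0).any (fun c => asciiLetters.contains c)) then
      true
    else
      let number := PySem.List.slice cs none (some (-1))
      let _delimiter := PySem.List.pyGet? cs (-1)   -- bound but never used, as in the Python
      let has_digit := number.any (fun i => PySem.Chars.isdigit i)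
      let all_valid := number.all (fun i => validNumberAlphabet.contains i)
      let first_valid := (PySem.List.pyGet? number 0).any (fun c => (asciiLetters ++ asciiDigits).contains c)
      let last_valid := (PySem.List.pyGet? number (-1)).any (fun c => (asciiLetters ++ asciiDigits).contains c)
      has_digit && all_valid && first_valid && last_valid

-- ===== PORT B =====
-- B's module-level sets
def bAlnum : PySem.Set Char := PySem.Set.ofList (asciiLetters ++ asciiDigits)
def bValid : PySem.Set Char := PySem.Set.ofList validNumberAlphabet
def bDelim : PySem.Set Char := PySem.Set.ofList ['.', ':', ')']

structure BState where
  accept : Bool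
  n : Nat
  first_alnum : Bool
  all_valid : Bool
  has_digit : Bool
  prev_alnum : Bool
deriving Repr, DecidableEq

def bStep (st : BState) (ch : Char) : BState :=
  { accept := bDelim.contains ch && st.first_alnum && st.all_valid
               && st.prev_alnum && (st.has_digit || st.n == 1)
    n := st.n + 1
    first_alnum := if st.n == 0 then bAlnum.contains ch else st.first_alnum
    all_valid := st.all_valid && bValid.contains ch
    has_digit := st.has_digit || PySem.Chars.isdigit ch
    prev_alnum := bAlnum.contains ch }

def is_proper_number_alt (text : String) : Bool :=
  (text.toList.foldl bStep ⟨false, 0, false, true, false, false⟩).accept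

-- ===== PRECONDITION & SPEC =====
def Spec_is_proper_number (text : String) (out : Bool) : Prop := out = is_proper_number_alt text
instance (text : String) (out : Bool) : Decidable (Spec_is_proper_number text out) := by unfold Spec_is_proper_number; infer_instance

-- ===== CLAIM (what is proved, stated in full; the proofs are below) =====
def Claim_equal_is_proper_number : Prop := ∀ (text : String), Dom_is_proper_number text → Spec_is_proper_number text (is_proper_number text)

-- ===== LEMMAS AND PROOFS =====

set_option maxRecDepth 8192 in
lemma bAlnum_eq : bAlnum = asciiLetters ++ asciiDigits := by
  unfold bAlnum; apply PySem.Set.ofList_eq_self_of_nodup; decide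

set_option maxRecDepth 8192 in
lemma bValid_eq : bValid = validNumberAlphabet := by
  unfold bValid; apply PySem.Set.ofList_eq_self_of_nodup; decide

lemma bDelim_eq : bDelim = ['.', ':', ')'] := by
  unfold bDelim; apply PySem.Set.ofList_eq_self_of_nodup; decide

lemma digits_isdigit (c : Char) (hc : asciiDigits.contains c = true) :
    PySem.Chars.isdigit c = true := by
  rw [List.contains_iff_mem] at hc
  fin_cases hc <;> decide

lemma letters_valid (c : Char) (hc : asciiLetters.contains c = true) :
    validNumberAlphabet.contains c = true := by
  rw [List.contains_iff_mem] at hc ⊢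
  unfold validNumberAlphabet
  exact List.mem_append_left _ (List.mem_append_left _ hc)

lemma digits_valid (c : Char) (hc : asciiDigits.contains c = true) :
    validNumberAlphabet.contains c = true := by
  rw [List.contains_iff_mem] at hc ⊢
  unfold validNumberAlphabet
  exact List.mem_append_left _ (List.mem_append_right _ hc)

lemma pyGet_neg_one {α : Type} (xs : List α) :
    PySem.List.pyGet? xs (-1) = xs.getLast? := by
  simp only [PySem.List.pyGet?, PySem.List.pyIdx?]
  rcases xs with _ | ⟨a, t⟩
  · rfl
  · rw [if_neg (by omega), if_pos (by simp)]
    simp only [Option.bind_some, List.getLast?_eq_getElem?, List.length_cons]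
    norm_num

lemma endswith_concat (q : List Char) (d e : Char) :
    PySem.Chars.endswith (q ++ [d]) [e] = (e == d) := by
  by_cases h : e = d
  · subst h
    simp only [beq_self_eq_true]
    rw [PySem.Chars.endswith_iff]
    exact List.suffix_append q [e]
  · have hne : (e == d) = false := by simp [h]
    rw [hne]
    refine Bool.eq_false_iff.mpr fun h' => ?_
    rw [PySem.Chars.endswith_iff] at h'
    obtain ⟨t, ht⟩ := h'
    have := congrArg List.getLast? ht
    simp at this
    exact h this

-- the common closed form both programs compute: last char is a delimiter and the body is ok
def bodyOk (b : List Char) : Bool :=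
  (b.head?.any fun c => (asciiLetters ++ asciiDigits).contains c)
    && b.all (fun c => validNumberAlphabet.contains c)
    && (b.getLast?.any fun c => (asciiLetters ++ asciiDigits).contains c)
    && (b.any PySem.Chars.isdigit || b.length == 1)

def chk (cs : List Char) : Bool :=
  (cs.getLast?.any fun c => (['.', ':', ')'] : List Char).contains c) && bodyOk cs.dropLast

lemma b_invariant (q : List Char) :
    q.foldl bStep ⟨false, 0, false, true, false, false⟩ =
      ⟨chk q, q.length, q.head?.any (fun c => (asciiLetters ++ asciiDigits).contains c),
        q.all (fun c => validNumberAlphabet.contains c), q.any PySem.Chars.isdigit,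
        q.getLast?.any (fun c => (asciiLetters ++ asciiDigits).contains c)⟩ := by
  induction q using List.reverseRecOn with
  | nil => simp [chk, bodyOk]
  | append_singleton q c ih =>
    rw [List.foldl_append, List.foldl_cons, List.foldl_nil, ih]
    simp only [bStep, bAlnum_eq, bValid_eq, bDelim_eq, chk, bodyOk,
      List.dropLast_concat, List.getLast?_concat, List.all_append, List.any_append,
      List.length_append, List.length_cons, List.length_nil, Option.any_some,
      List.all_cons, List.all_nil, List.any_cons, List.any_nil, Bool.or_false,
      Bool.and_true, BState.mk.injEq]
    refine ⟨?_, ?_⟩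
    · simp [Bool.and_assoc]
    · refine ⟨?_, ?_⟩
      · simp
      · refine ⟨?_, ?_, ?_, ?_⟩ <;> first | rfl | (cases q <;> simp)

lemma b_eq_chk (cs : List Char) :
    (cs.foldl bStep ⟨false, 0, false, true, false, false⟩).accept = chk cs := by
  rw [b_invariant]

-- ===== VERDICT (by name: the statement is the Claim_ definition above) =====
theorem is_proper_number_spec : Claim_equal_is_proper_number := by
  intro text _
  unfold Spec_is_proper_number is_proper_number is_proper_number_alt
  rw [b_eq_chk]
  generalize text.toList = cs
  induction cs using List.reverseRecOn with
  | nil => rfl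
  | append_singleton q d _ =>
    rcases q with _ | ⟨a, t⟩
    · simp [chk, bodyOk]
    · -- length ≥ 2
      have hlen : (a :: t ++ [d]).length = t.length + 2 := by simp
      rw [if_neg (by omega)]
      simp only [List.any_cons, List.any_nil, endswith_concat, Bool.or_false]
      by_cases hd : ('.' == d || (':' == d || ')' == d)) = true
      · rw [if_neg (by simp [hd])]
        have hdmem : d = '.' ∨ d = ':' ∨ d = ')' := by
          rcases Bool.or_eq_true _ _ |>.mp hd with h | h
          · exact Or.inl (eq_of_beq h).symm
          · rcases Bool.or_eq_true _ _ |>.mp h with h' | h'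
            · exact Or.inr (Or.inl (eq_of_beq h').symm)
            · exact Or.inr (Or.inr (eq_of_beq h').symm)
        have hdelim : ((['.', ':', ')'] : List Char).contains d) = true := by
          rcases hdmem with h | h | h <;> simp [h]
        have hslice : PySem.List.slice (a :: t ++ [d]) none (some (-1)) = a :: t := by
          rw [PySem.List.slice_to_neg_one]
          exact List.dropLast_concat ..
        rw [hslice]
        simp only [chk, List.getLast?_concat, Option.any_some, hdelim, Bool.true_and,
          List.dropLast_concat]
        rcases t with _ | ⟨b, t'⟩
        · -- two-character text, body is [a]
          by_cases hL : asciiLetters.contains a = true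
          · rw [if_pos ?_]
            · simp only [bodyOk, List.head?_cons, List.getLast?_singleton, Option.any_some,
                List.all_cons, List.all_nil, List.length_cons, List.length_nil]
              have hmem : a ∈ asciiLetters := List.contains_iff_mem.mp hL
              have hval : a ∈ validNumberAlphabet :=
                List.contains_iff_mem.mp (letters_valid a hL)
              simp [hmem, hval]
            · have hg : PySem.List.pyGet? ([a] ++ [d]) 0 = some a := rfl
              simp [List.contains_iff_mem.mp hL]
          · rw [if_neg ?_]
            · simp only [bodyOk, List.head?_cons, List.getLast?_singleton, Option.any_some,
                List.all_cons, List.all_nil, List.any_cons, List.any_nil,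
                List.length_cons, List.length_nil, Bool.and_true, Bool.or_false]
              simp only [PySem.List.pyGet?, PySem.List.pyIdx?]
              by_cases hD : asciiDigits.contains a = true
              · have hmd : a ∈ asciiDigits := List.contains_iff_mem.mp hD
                have hval : a ∈ validNumberAlphabet :=
                  List.contains_iff_mem.mp (digits_valid a hD)
                simp [hmd, hval, digits_isdigit a hD]
              · have hml : ¬ a ∈ asciiLetters := fun hm => hL (List.contains_iff_mem.mpr hm)
                have hmd : ¬ a ∈ asciiDigits := fun hm => hD (List.contains_iff_mem.mpr hm)
                simp [hml, hmd]
            · have hml : ¬ a ∈ asciiLetters := fun hm => hL (List.contains_iff_mem.mpr hm)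
              simp [hml]
        · -- body has length ≥ 2
          rw [if_neg (by simp)]
          have hget0 : PySem.List.pyGet? (a :: b :: t') 0 = some a := by
            have h0 : (0 : Int) < ((a :: b :: t').length : Int) := by
              exact_mod_cast Nat.succ_pos _
            simp only [PySem.List.pyGet?, PySem.List.pyIdx?, h0]
            simp
          simp only [bodyOk, List.head?_cons, Option.any_some, hget0, pyGet_neg_one]
          simp only [List.length_cons,
            show ((t'.length + 1 + 1 == 1) : Bool) = false from by simp, Bool.or_false]
          simp [Bool.and_comm, Bool.and_left_comm]
      · -- no proper ending
        rw [if_pos (by simpa using hd)]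
        simp only [Bool.or_eq_true, not_or] at hd
        obtain ⟨h1, h2, h3⟩ := hd
        have h1' : d ≠ '.' := fun he => h1 (by simp [he])
        have h2' : d ≠ ':' := fun he => h2 (by simp [he])
        have h3' : d ≠ ')' := fun he => h3 (by simp [he])
        have hc : chk (a :: t ++ [d]) = false := by
          unfold chk
          rw [List.getLast?_concat]
          simp [h1', h2', h3']
        rw [hc]
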